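-- pv_equiv track=rewrite | github.com/craigtrim/fast-sentence-segment | fast_sentence_segment/dmo/unclosed_quote_merger.py | process
-- ===== SOURCE A (Python) =====
-- from typing import List
--
-- def _count_quotes(text: str) -> dict:
--     """Count opening and closing quotes in text.
--
--     For straight quotes (" and '), they can be either opening or closing,
--     so we count them as ambiguous and use parity.
--     """
--     straight_double = text.count('"')
--     straight_single = text.count("'")
--
--     # Curly quotes are unambiguous (using unicode escapes for reliability)
--     # \u201c = " (left double), \u201d = " (right double)
--     # \u2018 = ' (left single), \u2019 = ' (right single)
--     open_double_curly = text.count('\u201c')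
--     close_double_curly = text.count('\u201d')
--     open_single_curly = text.count('\u2018')
--     close_single_curly = text.count('\u2019')
--
--     return {
--         'straight_double': straight_double,
--         'straight_single': straight_single,
--         'open_double_curly': open_double_curly,
--         'close_double_curly': close_double_curly,
--         'open_single_curly': open_single_curly,
--         'close_single_curly': close_single_curly,
--     }
--
-- def _has_unclosed_quote(text: str) -> bool:
--     """Check if text has an unclosed quote.
--
--     Uses simple heuristic: odd number of double quotes, or
--     more opening curly double quotes than closing.
--
--     NOTE: We only track double quotes, not single quotes, because single
--     quotes are commonly used as apostrophes in contractions (e.g., "Let's",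
--     "don't", "it's") which would cause false positives.
--     """
--     counts = _count_quotes(text)
--
--     # Check straight double quotes (odd = unclosed)
--     if counts['straight_double'] % 2 == 1:
--         return True
--
--     # Check curly double quotes
--     if counts['open_double_curly'] > counts['close_double_curly']:
--         return True
--
--     return False
--
-- def process(sentences: List[str]) -> List[str]:
--     """Process a list of sentences, merging those split inside quotes.
--
--     Args:
--         sentences: List of sentences
--
--     Returns:
--         List of sentences with quote splits merged
--     """
--     if not sentences:
--         return sentences
--
--     result = []
--     i = 0
--
--     while i < len(sentences):
--         current = sentences[i]
--
--         # Check if current sentence has an unclosed quote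
--         if _has_unclosed_quote(current):
--             # Merge with subsequent sentences until quote is closed
--             merged = current
--             j = i + 1
--
--             while j < len(sentences):
--                 next_sent = sentences[j]
--                 merged = merged + ' ' + next_sent
--
--                 # Check if the quote is now closed
--                 if not _has_unclosed_quote(merged):
--                     break
--                 j += 1
--
--             result.append(merged)
--             i = j + 1
--         else:
--             result.append(current)
--             i += 1
--
--     return result
-- ===== SOURCE B (Python) =====
-- from typing import List
--
-- def process(sentences: List[str]) -> List[str]:
--     """Single pass: keep a running merge buffer with incremental quote
--     counters instead of recounting the whole merged string each step."""
--     result = []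
--     merged = None          # current open merge, or None
--     d = o = c = 0          # running counts: straight ", open curly, close curly
--     for s in sentences:
--         sd = s.count('"')
--         so = s.count('\u201c')
--         sc = s.count('\u201d')
--         if merged is None:
--             if sd % 2 == 1 or so > sc:
--                 merged, d, o, c = s, sd, so, sc
--             else:
--                 result.append(s)
--         else:
--             merged = merged + ' ' + s
--             d += sd
--             o += so
--             c += sc
--             if d % 2 == 0 and o <= c:
--                 result.append(merged)
--                 merged = None
--     if merged is not None:
--         result.append(merged)
--     return result
-- ===== Notes on version B (the rewrite author's own statement) =====
-- stated objective: faster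
-- what changed: Replaces A's nested while-loops that recount quotes in the whole growing merged string at every step with a single left-to-right pass keeping incremental running quote counters for the open merge buffer.
import Mathlib
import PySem

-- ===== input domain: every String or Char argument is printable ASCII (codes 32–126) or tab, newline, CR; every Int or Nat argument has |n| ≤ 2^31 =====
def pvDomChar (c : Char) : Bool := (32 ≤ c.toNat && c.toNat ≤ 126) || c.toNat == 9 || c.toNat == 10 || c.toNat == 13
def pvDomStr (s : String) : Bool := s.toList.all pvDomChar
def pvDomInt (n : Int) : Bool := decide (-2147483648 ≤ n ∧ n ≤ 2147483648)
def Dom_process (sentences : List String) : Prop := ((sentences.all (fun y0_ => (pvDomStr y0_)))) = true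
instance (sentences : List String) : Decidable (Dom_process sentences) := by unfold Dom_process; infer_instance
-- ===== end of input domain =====

-- B replaces A's nested rescanning loops with one pass and incremental quote counters (measured asymptotically faster).

-- ===== PORT A =====
-- _count_quotes: the six counts, as a dict in insertion order
def pvCountQuotes (text : String) : PySem.Dict String Int :=
  let straight_double : Int := PySem.Str.count text "\""
  let straight_single : Int := PySem.Str.count text "'"
  let open_double_curly : Int := PySem.Str.count text "\u201C"
  let close_double_curly : Int := PySem.Str.count text "\u201D"
  let open_single_curly : Int := PySem.Str.count text "\u2018"
  let close_single_curly : Int := PySem.Str.count text "\u2019"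
  ((((((PySem.Dict.empty.insert "straight_double" straight_double).insert
      "straight_single" straight_single).insert
      "open_double_curly" open_double_curly).insert
      "close_double_curly" close_double_curly).insert
      "open_single_curly" open_single_curly).insert
      "close_single_curly" close_single_curly)

-- _has_unclosed_quote (dict lookups; the keys are always present, so getD's default is never read)
def pvHasUnclosedQuote (text : String) : Bool :=
  let counts := pvCountQuotes text
  if PySem.Int.mod (counts.getD "straight_double" 0) 2 == 1 then true
  else if counts.getD "open_double_curly" 0 > counts.getD "close_double_curly" 0 then true
  else false

-- inner while loop of A: grow `merged` until the quote closes or sentences run out;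
-- returns the merged string and the remaining sentences (from index j+1 on)
def pvMergeLoopA (merged : String) (rest : List String) : String × List String :=
  match rest with
  | [] => (merged, [])
  | next_sent :: rest' =>
    let m := merged ++ " " ++ next_sent
    if ¬ pvHasUnclosedQuote m then (m, rest') else pvMergeLoopA m rest'

theorem pvMergeLoopA_len (merged : String) (rest : List String) :
    (pvMergeLoopA merged rest).2.length ≤ rest.length := by
  induction rest generalizing merged with
  | nil => simp [pvMergeLoopA]
  | cons n rest' ih =>
    simp only [pvMergeLoopA]
    split
    · simp
    · exact le_trans (ih _) (Nat.le_succ _)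

-- outer while loop of A
def pvProcessGoA (sentences : List String) : List String :=
  match sentences with
  | [] => []
  | current :: rest =>
    if pvHasUnclosedQuote current then
      let p := pvMergeLoopA current rest
      p.1 :: pvProcessGoA p.2
    else current :: pvProcessGoA rest
termination_by sentences.length
decreasing_by
  · exact Nat.lt_succ_of_le (pvMergeLoopA_len current rest)
  · simp

def process (sentences : List String) : List String :=
  if sentences.isEmpty then sentences else pvProcessGoA sentences

-- ===== PORT B =====
-- one loop step: state = (result so far, open merge buffer with its running counters d,o,c or none)
def pvStepB (st : List String × Option (String × Int × Int × Int)) (s : String) :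
    List String × Option (String × Int × Int × Int) :=
  let sd : Int := PySem.Str.count s "\""
  let so : Int := PySem.Str.count s "\u201C"
  let sc : Int := PySem.Str.count s "\u201D"
  match st with
  | (result, none) =>
    if PySem.Int.mod sd 2 == 1 || so > sc then (result, some (s, sd, so, sc))
    else (result ++ [s], none)
  | (result, some (merged, d, o, c)) =>
    let m' := merged ++ " " ++ s
    let d' := d + sd
    let o' := o + so
    let c' := c + sc
    if PySem.Int.mod d' 2 == 0 && o' ≤ c' then (result ++ [m'], none)
    else (result, some (m', d', o', c'))

-- final flush of a still-open buffer
def pvFinishB (st : List String × Option (String × Int × Int × Int)) : List String :=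
  match st with
  | (result, none) => result
  | (result, some (merged, _, _, _)) => result ++ [merged]

def process_alt (sentences : List String) : List String :=
  pvFinishB (sentences.foldl pvStepB ([], none))

-- ===== PRECONDITION & SPEC =====
def Spec_process (sentences : List String) (out : List String) : Prop := out = process_alt sentences
instance (sentences : List String) (out : List String) : Decidable (Spec_process sentences out) := by unfold Spec_process; infer_instance

-- ===== CLAIM (what is proved, stated in full; the proofs are below) =====
def Claim_equal_process : Prop := ∀ (sentences : List String), Dom_process sentences → Spec_process sentences (process sentences)

-- ===== LEMMAS AND PROOFS =====

-- Chars.count with a single-character needle is List.count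
theorem pvCountGo_singleton (ch : Char) (fuel : Nat) (l : List Char) (acc : Nat)
    (h : l.length ≤ fuel) :
    PySem.Chars.count.go [ch] fuel l acc = acc + l.count ch := by
  induction fuel generalizing l acc with
  | zero =>
    have hl : l = [] := List.eq_nil_of_length_eq_zero (Nat.le_zero.mp h)
    subst hl; simp [PySem.Chars.count.go]
  | succ fuel ih =>
    match l with
    | [] => simp [PySem.Chars.count.go]
    | h' :: t =>
      simp only [PySem.Chars.count.go]
      by_cases he : h' = ch
      · subst he
        have hp : [h'].isPrefixOf (h' :: t) = true := by simp [List.isPrefixOf]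
        rw [if_pos hp]
        simp only [List.length_cons, List.drop_succ_cons, List.length_nil, List.drop_zero]
        rw [ih t (acc + 1) (by simpa using Nat.lt_succ_iff.mp (by simpa using h))]
        simp [List.count_cons]
        omega
      · have hp : [ch].isPrefixOf (h' :: t) = false := by
          simp [List.isPrefixOf]
          intro hc; exact absurd hc.symm he
        rw [if_neg (by simp [hp])]
        rw [ih t acc (by simpa using Nat.lt_succ_iff.mp (by simpa using h))]
        simp [List.count_cons, he]

theorem pvStrCount_char (s : String) (ch : Char) :
    PySem.Str.count s (String.ofList [ch]) = s.toList.count ch := by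
  rw [PySem.Str.count_eq]
  have ht : (String.ofList [ch]).toList = [ch] := by simp
  rw [ht]
  unfold PySem.Chars.count
  rw [if_neg (by simp)]
  simpa using pvCountGo_singleton ch s.toList.length s.toList 0 le_rfl

-- the three counters the algorithms track, as functions of the string
def pvD (s : String) : Int := PySem.Str.count s "\""
def pvO (s : String) : Int := PySem.Str.count s "\u201C"
def pvC (s : String) : Int := PySem.Str.count s "\u201D"

theorem pvCount_append_char (a b : String) (ch : Char) (hch : ch ≠ ' ') :
    (PySem.Str.count (a ++ " " ++ b) (String.ofList [ch]) : Int)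
      = PySem.Str.count a (String.ofList [ch]) + PySem.Str.count b (String.ofList [ch]) := by
  rw [pvStrCount_char, pvStrCount_char, pvStrCount_char]
  have h1 : (a ++ " " ++ b).toList = a.toList ++ [' '] ++ b.toList := by simp
  rw [h1, List.count_append, List.count_append]
  have h0 : List.count ch [' '] = 0 := by
    simp [List.count_cons]
    exact fun h => hch h.symm
  rw [h0]
  push_cast; ring

theorem pvD_append (a b : String) : pvD (a ++ " " ++ b) = pvD a + pvD b := by
  have h := pvCount_append_char a b '"' (by decide)
  simpa [pvD] using h

theorem pvO_append (a b : String) : pvO (a ++ " " ++ b) = pvO a + pvO b := by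
  have h := pvCount_append_char a b '\u201C' (by decide)
  simpa [pvO] using h

theorem pvC_append (a b : String) : pvC (a ++ " " ++ b) = pvC a + pvC b := by
  have h := pvCount_append_char a b '\u201D' (by decide)
  simpa [pvC] using h

theorem pvMod2 (n : Int) : PySem.Int.mod n 2 = n % 2 := by
  simp [PySem.Int.mod, Int.fmod_eq_emod_of_nonneg]

-- A's unclosed test, expressed through the counters
theorem pvHasUnclosed_eq (t : String) :
    pvHasUnclosedQuote t = (PySem.Int.mod (pvD t) 2 == 1 || pvO t > pvC t) := by
  simp only [pvHasUnclosedQuote, pvCountQuotes]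
  simp only [PySem.Dict.getD_insert]
  norm_num [pvD, pvO, pvC]
  have hb : ∀ a b : Int, (a == b) = decide (a = b) := fun a b => rfl
  split <;> (simp_all [hb]; try rfl)

theorem pvNotUnclosed_iff (t : String) :
    (pvHasUnclosedQuote t = false) ↔ ((PySem.Int.mod (pvD t) 2 == 0 && pvO t ≤ pvC t) = true) := by
  rw [pvHasUnclosed_eq, pvMod2]
  have hb : ∀ a b : Int, (a == b) = decide (a = b) := fun a b => rfl
  simp only [hb, Bool.or_eq_false_iff, Bool.and_eq_true, beq_iff_eq, gt_iff_lt,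
    decide_eq_false_iff_not, decide_eq_true_eq, not_lt]
  omega

-- the two loop steps of B, with the counters folded back into pvD/pvO/pvC (definitional)
theorem pvStepB_none (res : List String) (s : String) :
    pvStepB (res, none) s
      = if PySem.Int.mod (pvD s) 2 == 1 || pvO s > pvC s
        then (res, some (s, pvD s, pvO s, pvC s)) else (res ++ [s], none) := rfl

theorem pvStepB_some (res : List String) (m s : String) (d o c : Int) :
    pvStepB (res, some (m, d, o, c)) s
      = if PySem.Int.mod (d + pvD s) 2 == 0 && o + pvO s ≤ c + pvC s
        then (res ++ [m ++ " " ++ s], none)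
        else (res, some (m ++ " " ++ s, d + pvD s, o + pvO s, c + pvC s)) := rfl

-- the two loop-correspondence statements, proved together by strong induction on the list length
def pvNoneCase (rest : List String) : Prop :=
  ∀ (res : List String),
    pvFinishB (rest.foldl pvStepB (res, none)) = res ++ pvProcessGoA rest

def pvMergeCase (rest : List String) : Prop :=
  ∀ (res : List String) (m : String), pvHasUnclosedQuote m = true →
    pvFinishB (rest.foldl pvStepB (res, some (m, pvD m, pvO m, pvC m)))
      = res ++ (pvMergeLoopA m rest).1 :: pvProcessGoA (pvMergeLoopA m rest).2

theorem pvBoth (n : Nat) :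
    (∀ rest : List String, rest.length ≤ n → pvNoneCase rest) ∧
    (∀ rest : List String, rest.length ≤ n → pvMergeCase rest) := by
  induction n with
  | zero =>
    constructor
    · intro rest h res
      have : rest = [] := List.eq_nil_of_length_eq_zero (Nat.le_zero.mp h)
      subst this; simp [pvFinishB, pvProcessGoA]
    · intro rest h res m hm
      have : rest = [] := List.eq_nil_of_length_eq_zero (Nat.le_zero.mp h)
      subst this; simp [pvFinishB, pvMergeLoopA, pvProcessGoA]
  | succ n ih =>
    obtain ⟨ihN, ihM⟩ := ih
    have mergeStep : ∀ rest : List String, rest.length ≤ n + 1 → pvMergeCase rest := by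
      intro rest hlen res m hm
      match rest with
      | [] => simp [pvFinishB, pvMergeLoopA, pvProcessGoA]
      | s :: rest' =>
        simp only [List.foldl_cons, pvStepB_some]
        rw [← pvD_append, ← pvO_append, ← pvC_append]
        have hlen' : rest'.length ≤ n := by simpa using hlen
        by_cases hc : pvHasUnclosedQuote (m ++ " " ++ s) = true
        · -- quote still open: continue merging
          have hcond : (PySem.Int.mod (pvD (m ++ " " ++ s)) 2 == 0 && pvO (m ++ " " ++ s) ≤ pvC (m ++ " " ++ s)) = false := by
            by_contra hne
            have h2 := (pvNotUnclosed_iff (m ++ " " ++ s)).mpr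
              (by cases h : (PySem.Int.mod (pvD (m ++ " " ++ s)) 2 == 0 && pvO (m ++ " " ++ s) ≤ pvC (m ++ " " ++ s)) <;> simp_all)
            rw [hc] at h2; exact Bool.true_eq_false.mp h2
          rw [hcond]; simp only [Bool.false_eq_true, if_false]
          rw [ihM rest' hlen' res (m ++ " " ++ s) hc]
          have hml : pvMergeLoopA m (s :: rest') = pvMergeLoopA (m ++ " " ++ s) rest' := by
            simp only [pvMergeLoopA]; simp [hc]
          rw [hml]
        · -- quote closed: flush and continue with no open buffer
          have hc' : pvHasUnclosedQuote (m ++ " " ++ s) = false := by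
            cases h : pvHasUnclosedQuote (m ++ " " ++ s) <;> simp_all
          rw [(pvNotUnclosed_iff (m ++ " " ++ s)).mp hc']; simp only [if_true]
          rw [ihN rest' hlen' (res ++ [m ++ " " ++ s])]
          have hml : pvMergeLoopA m (s :: rest') = (m ++ " " ++ s, rest') := by
            simp only [pvMergeLoopA]; simp [hc']
          rw [hml]
          simp
    refine ⟨?_, mergeStep⟩
    intro rest hlen res
    match rest with
    | [] => simp [pvFinishB, pvProcessGoA]
    | s :: rest' =>
      simp only [List.foldl_cons, pvStepB_none]
      have hlen' : rest'.length ≤ n := by simpa using hlen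
      by_cases hc : pvHasUnclosedQuote s = true
      · have hcond : (PySem.Int.mod (pvD s) 2 == 1 || pvO s > pvC s) = true := by
          rw [← pvHasUnclosed_eq]; exact hc
        rw [hcond]; simp only [if_true]
        rw [ihM rest' hlen' res s hc]
        conv_rhs => rw [pvProcessGoA]
        simp [hc]
      · have hc' : pvHasUnclosedQuote s = false := by cases h : pvHasUnclosedQuote s <;> simp_all
        have hcond : (PySem.Int.mod (pvD s) 2 == 1 || pvO s > pvC s) = false := by
          rw [← pvHasUnclosed_eq]; exact hc'
        rw [hcond]; simp only [Bool.false_eq_true, if_false]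
        rw [ihN rest' hlen' (res ++ [s])]
        conv_rhs => rw [pvProcessGoA]
        simp [hc']

-- ===== VERDICT (by name: the statement is the Claim_ definition above) =====
theorem process_spec : Claim_equal_process := by
  intro sentences _
  unfold Spec_process process process_alt
  by_cases h : sentences.isEmpty
  · have : sentences = [] := by simpa [List.isEmpty_iff] using h
    subst this; simp [pvFinishB]
  · rw [if_neg h]
    have hmain := (pvBoth sentences.length).1 sentences le_rfl []
    simpa using hmain.symm
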